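-- pv_equiv track=rewrite | github.com/saleha1wer/Botbowl-Agent | convert_action.py | normal_to_short_mask
-- ===== SOURCE A (Python) =====
-- def chunks(lst, n):
--     """Yield successive n-sized chunks from lst."""
--     for i in range(0, len(lst), n):
--         yield lst[i:i + n]
--
-- def normal_to_short_mask(normal_mask):
--     short_mask = []
--     for boo in normal_mask[:22]:
--         short_mask.append(boo)
--     spac_acts = chunks(normal_mask[22:],198)
--     for act in spac_acts:
--         if True in act:
--             short_mask.append(True)
--         else:
--             short_mask.append(False)
--     return short_mask
-- ===== SOURCE B (Python) =====
-- def normal_to_short_mask(normal_mask):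
--     # One streaming pass: copy the first 22 entries, then OR-accumulate each
--     # 198-wide block of the remainder with a position counter, flushing the
--     # final partial block if any element of it was seen.
--     short_mask = list(normal_mask[:22])
--     cnt = 0
--     found = False
--     for x in normal_mask[22:]:
--         found = found or (x == True)
--         cnt += 1
--         if cnt == 198:
--             short_mask.append(found)
--             cnt = 0
--             found = False
--     if cnt:
--         short_mask.append(found)
--     return short_mask
-- ===== Notes on version B (the rewrite author's own statement) =====
-- stated objective: alternative
-- what changed: Replaced A's generator that slices the tail into 198-element chunks and scans each chunk for True with a single flat loop over the tail keeping a position counter and an OR-accumulator flag, flushed at each completed block and once for a leftover partial block.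
import Mathlib
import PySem

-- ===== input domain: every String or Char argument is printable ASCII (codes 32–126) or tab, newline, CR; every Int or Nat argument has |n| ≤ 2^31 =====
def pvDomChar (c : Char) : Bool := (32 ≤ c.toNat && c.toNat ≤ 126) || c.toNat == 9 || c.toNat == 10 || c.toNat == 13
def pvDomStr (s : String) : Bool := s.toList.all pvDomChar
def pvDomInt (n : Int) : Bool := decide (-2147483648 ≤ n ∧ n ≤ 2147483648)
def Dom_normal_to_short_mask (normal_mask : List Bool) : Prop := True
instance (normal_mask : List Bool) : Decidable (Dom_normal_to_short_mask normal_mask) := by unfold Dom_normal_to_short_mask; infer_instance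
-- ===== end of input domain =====

-- B replaces A's slice-into-198-chunks-then-scan structure with a single streaming
-- pass keeping a position counter and an OR flag (objective: alternative decomposition).

-- ===== PORT A =====
-- A: copy normal_mask[:22], then for each 198-chunk of normal_mask[22:] append (True in chunk).
def normal_to_short_mask (normal_mask : List Bool) : List Bool :=
  let short0 := (PySem.List.slice normal_mask none (some 22)).foldl (fun acc boo => acc ++ [boo]) []
  let rest := PySem.List.slice normal_mask (some 22) none
  (PySem.List.pyRange 0 (rest.length : Int) 198).foldl
    (fun acc i =>
      if (PySem.List.slice rest (some i) (some (i + 198))).contains true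
      then acc ++ [true] else acc ++ [false]) short0

-- ===== PORT B =====
-- B: one flat loop over normal_mask[22:] with a counter (mod 198) and an OR flag,
-- flushed when a block completes and once more for a leftover partial block.
def normal_to_short_mask_alt (normal_mask : List Bool) : List Bool :=
  let st := (PySem.List.slice normal_mask (some 22) none).foldl
    (fun (st : List Bool × Nat × Bool) (x : Bool) =>
      let found := st.2.2 || (x == true)
      let cnt := st.2.1 + 1
      if cnt = 198 then (st.1 ++ [found], 0, false) else (st.1, cnt, found))
    (PySem.List.slice normal_mask none (some 22), 0, false)
  if st.2.1 ≠ 0 then st.1 ++ [st.2.2] else st.1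

-- ===== PRECONDITION & SPEC =====
def Spec_normal_to_short_mask (normal_mask : List Bool) (out : List Bool) : Prop := out = normal_to_short_mask_alt normal_mask
instance (normal_mask : List Bool) (out : List Bool) : Decidable (Spec_normal_to_short_mask normal_mask out) := by unfold Spec_normal_to_short_mask; infer_instance

-- ===== CLAIM (what is proved, stated in full; the proofs are below) =====
def Claim_equal_normal_to_short_mask : Prop := ∀ (normal_mask : List Bool), Dom_normal_to_short_mask normal_mask → Spec_normal_to_short_mask normal_mask (normal_to_short_mask normal_mask)

-- ===== LEMMAS AND PROOFS =====

-- Common reference shape: OR of successive 198-chunks.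
def chunkOr : List Bool → List Bool
  | [] => []
  | x :: l => ((x :: l).take 198).contains true :: chunkOr ((x :: l).drop 198)
termination_by l => l.length
decreasing_by simp

-- a range with step 198 peels its head
lemma pyRange_chunk_cons (a b : Int) (h : a < b) :
    PySem.List.pyRange a b 198 = a :: PySem.List.pyRange (a + 198) b 198 := by
  rw [PySem.List.pyRange_of_pos a b (by norm_num), PySem.List.pyRange_of_pos (a + 198) b (by norm_num)]
  have hx : (0:Int) ≤ b - a - 1 := by omega
  have hdiv : (b - a + 198 - 1) / 198 = (b - a - 1) / 198 + 1 := by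
    have : b - a + 198 - 1 = (b - a - 1) + 1 * 198 := by ring
    rw [this, Int.add_mul_ediv_right _ _ (by norm_num)]
  have hq : (0:Int) ≤ (b - a - 1) / 198 := Int.ediv_nonneg hx (by norm_num)
  have hcount : (if a < b then ((b - a + 198 - 1) / 198).toNat else 0)
      = (if a + 198 < b then ((b - (a + 198) + 198 - 1) / 198).toNat else 0) + 1 := by
    rw [if_pos h, hdiv]
    by_cases h2 : a + 198 < b
    · rw [if_pos h2]
      have : b - (a + 198) + 198 - 1 = b - a - 1 := by ring
      rw [this]
      omega
    · rw [if_neg h2]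
      have hlt : b - a - 1 < 198 := by omega
      rw [Int.ediv_eq_zero_of_lt hx hlt]
      omega
  rw [hcount, List.range_succ_eq_map, List.map_cons, List.map_map]
  refine congrArg₂ _ (by norm_num) ?_
  refine List.map_congr_left (fun k _ => ?_)
  simp only [Function.comp_apply]
  push_cast
  ring

lemma if_append_bool (c : Bool) (acc : List Bool) :
    (if c = true then acc ++ [true] else acc ++ [false]) = acc ++ [c] := by
  cases c <;> simp

-- A's loop over chunk start indices j, j+198, … computes chunkOr of the suffix L.drop j
lemma Afold (L : List Bool) (j : Nat) (acc : List Bool) :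
    (PySem.List.pyRange (j : Int) (L.length : Int) 198).foldl
      (fun acc i =>
        if (PySem.List.slice L (some i) (some (i + 198))).contains true
        then acc ++ [true] else acc ++ [false]) acc
    = acc ++ chunkOr (L.drop j) := by
  have key : ∀ (n j : Nat) (acc : List Bool), L.length ≤ j + n →
      (PySem.List.pyRange (j : Int) (L.length : Int) 198).foldl
        (fun acc i =>
          if (PySem.List.slice L (some i) (some (i + 198))).contains true
          then acc ++ [true] else acc ++ [false]) acc
      = acc ++ chunkOr (L.drop j) := by
    intro n
    induction n with
    | zero =>
      intro j acc hle
      have hj : L.length ≤ j := by omega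
      rw [PySem.List.pyRange_of_pos _ _ (by norm_num : (0:Int) < 198),
        if_neg (by exact_mod_cast Nat.not_lt.mpr hj)]
      simp [List.drop_of_length_le hj, chunkOr]
    | succ n ih =>
      intro j acc hle
      by_cases hj : j < L.length
      · rw [pyRange_chunk_cons _ _ (by exact_mod_cast hj), List.foldl_cons]
        have hslice : PySem.List.slice L (some (j : Int)) (some ((j : Int) + 198))
            = (L.drop j).take 198 := by exact_mod_cast PySem.List.slice_natCast_add L j 198
        rw [hslice, if_append_bool]
        have hcast : ((j : Int) + 198) = ((j + 198 : Nat) : Int) := by push_cast; ring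
        rw [hcast, ih (j + 198) _ (by omega)]
        obtain ⟨x, l', hx⟩ := List.exists_cons_of_ne_nil
          (show L.drop j ≠ [] by simp [List.drop_eq_nil_iff]; omega)
        rw [hx, chunkOr]
        have hdd : (x :: l').drop 198 = L.drop (j + 198) := by
          rw [← hx, List.drop_drop]
          try congr 1
          try omega
        rw [hdd]
        simp
      · have hle' : L.length ≤ j := by omega
        rw [PySem.List.pyRange_of_pos _ _ (by norm_num : (0:Int) < 198),
          if_neg (by exact_mod_cast Nat.not_lt.mpr hle')]
        simp [List.drop_of_length_le hle', chunkOr]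
  exact key L.length j acc (by omega)

-- the value B's stream still owes, given c elements of the current block already seen with flag f
def streamSpec : List Bool → Nat → Bool → List Bool
  | [], c, f => if c ≠ 0 then [f] else []
  | x :: l, c, f => if c + 1 = 198 then (f || x) :: streamSpec l 0 false else streamSpec l (c + 1) (f || x)

lemma streamAux : ∀ (l : List Bool) (c : Nat) (f : Bool), 0 < c → c < 198 →
    streamSpec l c f = (f || (l.take (198 - c)).contains true) :: streamSpec (l.drop (198 - c)) 0 false := by
  intro l
  induction l with
  | nil => intro c f hc _; simp [streamSpec, hc.ne']
  | cons x l ih =>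
    intro c f hc hlt
    by_cases h198 : c + 1 = 198
    · have h1 : 198 - c = 1 := by omega
      simp [streamSpec, h198, h1]
    · have h2 : 198 - c = (198 - (c + 1)) + 1 := by omega
      rw [streamSpec, if_neg h198, ih (c + 1) (f || x) (by omega) (by omega), h2]
      simp [Bool.or_assoc]

lemma streamSpec_zero (l : List Bool) : streamSpec l 0 false = chunkOr l := by
  have key : ∀ (n : Nat) (l : List Bool), l.length ≤ n → streamSpec l 0 false = chunkOr l := by
    intro n
    induction n with
    | zero =>
      intro l hl
      obtain rfl : l = [] := List.eq_nil_of_length_eq_zero (by omega)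
      simp [streamSpec, chunkOr]
    | succ n ih =>
      intro l hl
      cases l with
      | nil => simp [streamSpec, chunkOr]
      | cons x l' =>
        have hl' : l'.length ≤ n := by
          simpa using Nat.lt_succ_iff.mp (Nat.lt_of_lt_of_le (Nat.lt_succ_of_le le_rfl) (by simpa using hl))
        rw [streamSpec, if_neg (by norm_num), streamAux l' 1 (false || x) (by omega) (by omega),
          chunkOr]
        have h197 : 198 - 1 = 197 := by norm_num
        rw [h197, ih (l'.drop 197) (by rw [List.length_drop]; omega)]
        simp
  exact key l.length l le_rfl

lemma Bfold : ∀ (l : List Bool) (acc : List Bool) (c : Nat) (f : Bool), c < 198 →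
    (let st := l.foldl
        (fun (st : List Bool × Nat × Bool) (x : Bool) =>
          let found := st.2.2 || (x == true)
          let cnt := st.2.1 + 1
          if cnt = 198 then (st.1 ++ [found], 0, false) else (st.1, cnt, found))
        (acc, c, f)
     if st.2.1 ≠ 0 then st.1 ++ [st.2.2] else st.1)
    = acc ++ streamSpec l c f := by
  intro l
  induction l with
  | nil =>
    intro acc c f _
    by_cases hc : c = 0 <;> simp [streamSpec, hc]
  | cons x l ih =>
    intro acc c f hc
    show (let st := l.foldl _ (if c + 1 = 198 then (acc ++ [f || (x == true)], 0, false)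
            else (acc, c + 1, f || (x == true)))
          if st.2.1 ≠ 0 then st.1 ++ [st.2.2] else st.1) = acc ++ streamSpec (x :: l) c f
    by_cases h198 : c + 1 = 198
    · rw [if_pos h198, ih (acc ++ [f || (x == true)]) 0 false (by norm_num)]
      rw [streamSpec, if_pos h198]
      simp
    · rw [if_neg h198, ih acc (c + 1) (f || (x == true)) (by omega)]
      rw [streamSpec, if_neg h198]
      simp

-- ===== VERDICT (by name: the statement is the Claim_ definition above) =====
theorem normal_to_short_mask_spec : Claim_equal_normal_to_short_mask := by
  intro m _
  unfold Spec_normal_to_short_mask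
  have hs1 : PySem.List.slice m none (some 22) = m.take 22 := by
    exact_mod_cast PySem.List.slice_to_natCast m 22
  have hs2 : PySem.List.slice m (some 22) none = m.drop 22 := by
    exact_mod_cast PySem.List.slice_from_natCast m 22
  have hA : normal_to_short_mask m = m.take 22 ++ chunkOr (m.drop 22) := by
    have h := Afold (m.drop 22) 0 (m.take 22)
    rw [show ((0 : Nat) : Int) = 0 from rfl, List.drop_zero] at h
    simp only [normal_to_short_mask]
    rw [hs1, hs2, PySem.List.foldl_append_singleton, List.nil_append]
    exact h
  have hB : normal_to_short_mask_alt m = m.take 22 ++ chunkOr (m.drop 22) := by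
    have h := Bfold (m.drop 22) (m.take 22) 0 false (by norm_num)
    rw [streamSpec_zero] at h
    simp only [normal_to_short_mask_alt]
    rw [hs1, hs2]
    exact h
  rw [hA, hB]
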